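-- pv_equiv track=rewrite | github.com/arcboundrav/layer_sort | combinatorics.py | translate_list_of_sublist_of_objects_into_list_of_sublist_of_indices
-- ===== SOURCE A (Python) =====
-- def translate_list_of_sublist_of_objects_into_list_of_sublist_of_indices(list_of_sublist_of_objects):
--     counter = 0
--     result = []
--     translation_dict = {}
--     for sublist_of_objects in list_of_sublist_of_objects:
--         derived_sublist = []
--         for object in sublist_of_objects:
--             derived_sublist.append(counter)
--             translation_dict[counter] = object
--             counter += 1
--         result.append(derived_sublist)
--     return result, translation_dict
-- ===== SOURCE B (Python) =====
-- def translate_list_of_sublist_of_objects_into_list_of_sublist_of_indices(list_of_sublist_of_objects):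
--     sublists = [list(s) for s in list_of_sublist_of_objects]
--     result = []
--     offset = 0
--     for s in sublists:
--         result.append(list(range(offset, offset + len(s))))
--         offset += len(s)
--     translation_dict = dict(enumerate(x for s in sublists for x in s))
--     return result, translation_dict
-- ===== Notes on version B (the rewrite author's own statement) =====
-- stated objective: alternative
-- what changed: Replaces the single per-element counter loop that builds both outputs at once with an offset/prefix-sum pass emitting each sublist's indices as range(offset, offset+len), and builds the translation dict independently as dict(enumerate(flattened)).
import Mathlib
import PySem

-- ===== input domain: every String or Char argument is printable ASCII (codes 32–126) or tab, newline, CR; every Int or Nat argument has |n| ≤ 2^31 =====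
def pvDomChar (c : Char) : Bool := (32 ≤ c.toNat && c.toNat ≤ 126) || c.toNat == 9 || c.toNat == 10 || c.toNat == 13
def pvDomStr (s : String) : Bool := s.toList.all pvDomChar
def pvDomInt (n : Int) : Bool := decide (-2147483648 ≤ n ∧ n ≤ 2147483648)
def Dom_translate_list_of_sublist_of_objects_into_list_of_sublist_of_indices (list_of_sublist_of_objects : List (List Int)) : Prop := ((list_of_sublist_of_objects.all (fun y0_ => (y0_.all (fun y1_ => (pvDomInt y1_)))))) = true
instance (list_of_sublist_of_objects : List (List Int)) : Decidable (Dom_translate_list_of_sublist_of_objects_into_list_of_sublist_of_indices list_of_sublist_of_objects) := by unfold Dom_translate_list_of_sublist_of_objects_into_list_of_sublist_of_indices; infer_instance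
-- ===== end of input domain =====

-- B builds the index sublists from running offsets via range() and the translation dict from enumerate() of the flattened input, instead of A's single per-element counter loop; same cost, different decomposition.


-- ===== PORT A =====
-- inner loop: 'for object in sublist: derived_sublist.append(counter); translation_dict[counter] = object; counter += 1'
def pvInnerA : List Int → Int → List Int → PySem.Dict Int Int → Int × List Int × PySem.Dict Int Int
  | [], counter, derived, td => (counter, derived, td)
  | obj :: rest, counter, derived, td =>
      pvInnerA rest (counter + 1) (derived ++ [counter]) (td.insert counter obj)

-- outer loop: 'for sublist_of_objects in list_of_sublist_of_objects: … result.append(derived_sublist)'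
def pvOuterA : List (List Int) → Int → List (List Int) → PySem.Dict Int Int → List (List Int) × PySem.Dict Int Int
  | [], _, result, td => (result, td)
  | sub :: rest, counter, result, td =>
      let st := pvInnerA sub counter [] td
      pvOuterA rest st.1 (result ++ [st.2.1]) st.2.2

def translate_list_of_sublist_of_objects_into_list_of_sublist_of_indices (list_of_sublist_of_objects : List (List Int)) : List (List Int) × (List (Int × Int)) :=
  let r := pvOuterA list_of_sublist_of_objects 0 [] PySem.Dict.empty
  (r.1, r.2.items)

-- ===== PORT B =====
-- offset loop: 'for s in sublists: result.append(list(range(offset, offset+len(s)))); offset += len(s)'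
def pvRangesB (sublists : List (List Int)) : Int × List (List Int) :=
  sublists.foldl (fun acc s => (acc.1 + s.length, acc.2 ++ [PySem.List.pyRange acc.1 (acc.1 + s.length) 1])) (0, [])

-- 'dict(enumerate(x for s in sublists for x in s))': pair indices 0..n-1 with the flattened elements, then dict()
def pvEnumPairs (flat : List Int) : List (Int × Int) :=
  (PySem.List.pyRange 0 flat.length 1).zip flat

def translate_list_of_sublist_of_objects_into_list_of_sublist_of_indices_alt (list_of_sublist_of_objects : List (List Int)) : List (List Int) × (List (Int × Int)) :=
  let result := (pvRangesB list_of_sublist_of_objects).2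
  let translation_dict :=
    (pvEnumPairs list_of_sublist_of_objects.flatten).foldl (fun d p => d.insert p.1 p.2) PySem.Dict.empty
  (result, translation_dict.items)

-- ===== PRECONDITION & SPEC =====
def Spec_translate_list_of_sublist_of_objects_into_list_of_sublist_of_indices (list_of_sublist_of_objects : List (List Int)) (out : List (List Int) × (List (Int × Int))) : Prop := out = translate_list_of_sublist_of_objects_into_list_of_sublist_of_indices_alt list_of_sublist_of_objects
instance (list_of_sublist_of_objects : List (List Int)) (out : List (List Int) × (List (Int × Int))) : Decidable (Spec_translate_list_of_sublist_of_objects_into_list_of_sublist_of_indices list_of_sublist_of_objects out) := by unfold Spec_translate_list_of_sublist_of_objects_into_list_of_sublist_of_indices; infer_instance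

-- ===== CLAIM (what is proved, stated in full; the proofs are below) =====
def Claim_equal_translate_list_of_sublist_of_objects_into_list_of_sublist_of_indices : Prop := ∀ (list_of_sublist_of_objects : List (List Int)), Dom_translate_list_of_sublist_of_objects_into_list_of_sublist_of_indices list_of_sublist_of_objects → Spec_translate_list_of_sublist_of_objects_into_list_of_sublist_of_indices list_of_sublist_of_objects (translate_list_of_sublist_of_objects_into_list_of_sublist_of_indices list_of_sublist_of_objects)


-- ===== LEMMAS AND PROOFS =====
theorem pvInnerA_spec (sub : List Int) : ∀ (c : Int) (ds : List Int) (td : PySem.Dict Int Int),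
    (∀ k ∈ td.keys, k < c) →
    pvInnerA sub c ds td =
      (c + sub.length, ds ++ PySem.List.pyRange c (c + sub.length) 1, (pvInnerA sub c ds td).2.2) ∧
    (pvInnerA sub c ds td).2.2.items = td.items ++ (PySem.List.pyRange c (c + sub.length) 1).zip sub ∧
    (∀ k ∈ (pvInnerA sub c ds td).2.2.keys, k < c + sub.length) := by
  induction sub with
  | nil =>
      intro c ds td h
      refine ⟨by simp [pvInnerA], by simp [pvInnerA], by simpa [pvInnerA] using h⟩
  | cons obj rest ih =>
      intro c ds td h
      have hnc : td.contains c = false := by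
        by_contra hc
        have : c ∈ td.keys := (PySem.Dict.contains_iff_mem_keys td c).mp (by
          cases hcc : td.contains c
          · exact absurd hcc hc
          · rfl)
        exact absurd (h c this) (lt_irrefl c)
      have hk' : ∀ k ∈ (td.insert c obj).keys, k < c + 1 := by
        intro k hk
        rcases (PySem.Dict.mem_keys_insert td c k obj).mp hk with rfl | hk
        · omega
        · have := h k hk; omega
      obtain ⟨h1, h2, h3⟩ := ih (c + 1) (ds ++ [c]) (td.insert c obj) hk'
      have he : c + (((obj :: rest).length : Nat) : Int) = c + 1 + ((rest.length : Nat) : Int) := by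
        push_cast [List.length_cons]; ring
      have hrange : PySem.List.pyRange c (c + ((obj :: rest).length : Nat)) 1
          = c :: PySem.List.pyRange (c + 1) (c + 1 + (rest.length : Nat)) 1 := by
        rw [he, PySem.List.pyRange_one_cons (by omega)]
      refine ⟨?_, ?_, ?_⟩
      · show pvInnerA rest (c+1) (ds ++ [c]) (td.insert c obj) = _
        rw [h1, hrange]
        refine congrArg₂ Prod.mk ?_ (congrArg₂ Prod.mk ?_ ?_)
        · push_cast [List.length_cons]; ring
        · simp
        · simp [pvInnerA]
      · show (pvInnerA rest (c+1) (ds ++ [c]) (td.insert c obj)).2.2.items = _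
        rw [h2, hrange, PySem.Dict.items_insert_of_not_contains td obj hnc]
        simp
      · show ∀ k ∈ (pvInnerA rest (c+1) (ds ++ [c]) (td.insert c obj)).2.2.keys, _
        intro k hk
        have := h3 k hk
        push_cast [List.length_cons] at this ⊢; omega

theorem pvOuterA_spec (l : List (List Int)) : ∀ (c : Int) (res : List (List Int)) (td : PySem.Dict Int Int),
    (∀ k ∈ td.keys, k < c) →
    (pvOuterA l c res td).1 = (l.foldl (fun acc s => (acc.1 + (s.length : Int), acc.2 ++ [PySem.List.pyRange acc.1 (acc.1 + s.length) 1])) (c, res)).2 ∧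
    (pvOuterA l c res td).2.items = td.items ++ (PySem.List.pyRange c (c + l.flatten.length) 1).zip l.flatten ∧
    (∀ k ∈ (pvOuterA l c res td).2.keys, k < c + l.flatten.length) := by
  induction l with
  | nil =>
      intro c res td h
      refine ⟨by simp [pvOuterA], by simp [pvOuterA], by simpa [pvOuterA] using h⟩
  | cons sub rest ih =>
      intro c res td h
      obtain ⟨h1, h2, h3⟩ := pvInnerA_spec sub c [] td h
      have hstep : pvOuterA (sub :: rest) c res td
          = pvOuterA rest (c + sub.length) (res ++ [PySem.List.pyRange c (c + sub.length) 1]) (pvInnerA sub c [] td).2.2 := by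
        show pvOuterA rest (pvInnerA sub c [] td).1 (res ++ [(pvInnerA sub c [] td).2.1]) (pvInnerA sub c [] td).2.2 = _
        rw [show (pvInnerA sub c [] td).1 = c + sub.length from by rw [h1],
            show (pvInnerA sub c [] td).2.1 = [] ++ PySem.List.pyRange c (c + sub.length) 1 from by rw [h1]]
        simp
      obtain ⟨g1, g2, g3⟩ := ih (c + sub.length) (res ++ [PySem.List.pyRange c (c + sub.length) 1]) (pvInnerA sub c [] td).2.2 h3
      have he : c + (((sub :: rest).flatten.length : Nat) : Int)
          = c + (sub.length : Int) + (rest.flatten.length : Int) := by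
        rw [List.flatten_cons, List.length_append]; push_cast; ring
      have hsplit : PySem.List.pyRange c (c + ((sub :: rest).flatten.length : Nat)) 1
          = PySem.List.pyRange c (c + sub.length) 1 ++ PySem.List.pyRange (c + sub.length) (c + sub.length + rest.flatten.length) 1 := by
        rw [he, PySem.List.pyRange_one_append c (c + sub.length) _ (by omega) (by omega)]
      have hlen : (PySem.List.pyRange c (c + sub.length) 1).length = sub.length := by
        rw [PySem.List.length_pyRange_one]; omega
      refine ⟨?_, ?_, ?_⟩
      · rw [hstep, g1]; rfl
      · rw [hstep, g2, h2, hsplit, List.flatten_cons, List.zip_append (by rw [hlen])]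
        simp
      · intro k hk
        rw [hstep] at hk
        have := g3 k hk
        rw [List.flatten_cons, List.length_append]
        push_cast at this ⊢; omega

theorem pvEnum_dict_items (flat : List Int) :
    ((pvEnumPairs flat).foldl (fun d p => d.insert p.1 p.2) (PySem.Dict.empty : PySem.Dict Int Int)).items
      = pvEnumPairs flat := by
  have hlen : (PySem.List.pyRange 0 (flat.length : Int) 1).length = flat.length := by
    rw [PySem.List.length_pyRange_one]; omega
  have hfst : (pvEnumPairs flat).map Prod.fst = PySem.List.pyRange 0 (flat.length : Int) 1 :=
    List.map_fst_zip (by rw [hlen])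
  have := PySem.Dict.items_foldl_insert_fresh (pvEnumPairs flat) Prod.fst Prod.snd
      (PySem.Dict.empty : PySem.Dict Int Int)
      (fun a _ => PySem.Dict.contains_empty a.1)
      (by rw [hfst]; exact PySem.List.nodup_pyRange_one 0 _)
  simpa using this

-- ===== VERDICT (by name: the statement is the Claim_ definition above) =====
theorem translate_list_of_sublist_of_objects_into_list_of_sublist_of_indices_spec : Claim_equal_translate_list_of_sublist_of_objects_into_list_of_sublist_of_indices := by
  intro l _
  unfold Spec_translate_list_of_sublist_of_objects_into_list_of_sublist_of_indices
  obtain ⟨h1, h2, _⟩ := pvOuterA_spec l 0 [] PySem.Dict.empty (by simp [PySem.Dict.keys_empty])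
  have ea : translate_list_of_sublist_of_objects_into_list_of_sublist_of_indices l
      = ((pvOuterA l 0 [] PySem.Dict.empty).1, (pvOuterA l 0 [] PySem.Dict.empty).2.items) := rfl
  have eb : translate_list_of_sublist_of_objects_into_list_of_sublist_of_indices_alt l
      = ((pvRangesB l).2, ((pvEnumPairs l.flatten).foldl (fun d p => d.insert p.1 p.2) PySem.Dict.empty).items) := rfl
  rw [ea, eb, pvEnum_dict_items]
  refine congrArg₂ Prod.mk ?_ ?_
  · rw [h1]; rfl
  · rw [h2]; simp [pvEnumPairs, PySem.Dict.empty]
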